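-- pv_equiv track=rewrite | github.com/roadytom/ds-algo-solutions | python/codeforces/constructive_algorithms/1036c.classy_numbers.py | dp_solve
-- ===== SOURCE A (Python) =====
-- from functools import cache
--
-- def dp_solve(num):
--     num_arr = list(map(int, str(num)))
--     digit_count = len(num_arr)
--
--     @cache
--     def dp(idx, non_zero_count, under, is_zero_leading):
--         if idx == digit_count:
--             return int(not is_zero_leading)
--         max_digit = 9 if under else num_arr[idx]
--         res = 0
--         for digit in range(max_digit + 1):
--             new_is_zero_leading = is_zero_leading and digit == 0
--             new_under = under or digit != max_digit
--             if digit != 0 and non_zero_count >= 3: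
--                 continue
--             res += dp(idx + 1, non_zero_count + int(digit != 0), new_under, new_is_zero_leading)
--         return res
--
--     return dp(0, 0, False, True)
-- ===== SOURCE B (Python) =====
-- from math import comb
--
--
-- def classy_tail(free, k):
--     # numbers formed by `free` free digit positions using at most k nonzero digits
--     return sum(comb(free, j) * 9 ** j for j in range(k + 1))
--
--
-- def dp_solve(num):
--     digits = [int(c) for c in str(num)]
--     n = len(digits)
--     total = 0
--     nonzero = 0
--     for i, d in enumerate(digits):
--         free = n - 1 - i
--         for c in range(d):
--             nz = nonzero + (1 if c != 0 else 0)
--             if nz <= 3: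
--                 total += classy_tail(free, 3 - nz)
--         nonzero += 1 if d != 0 else 0
--     if nonzero <= 3:
--         total += 1  # num itself
--     return total - 1  # 0 (the all-zero string) is never counted
-- ===== Notes on version B (the rewrite author's own statement) =====
-- stated objective: simpler
-- what changed: Replaces A's memoized digit-DP recursion (suffix index plus nonzero-count/under/leading-zero state) by a single left-to-right walk over the digits that, for each position and each smaller leading digit, adds a closed-form binomial count of classy completions of the free positions, then adjusts for num itself and for zero.
import Mathlib
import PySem

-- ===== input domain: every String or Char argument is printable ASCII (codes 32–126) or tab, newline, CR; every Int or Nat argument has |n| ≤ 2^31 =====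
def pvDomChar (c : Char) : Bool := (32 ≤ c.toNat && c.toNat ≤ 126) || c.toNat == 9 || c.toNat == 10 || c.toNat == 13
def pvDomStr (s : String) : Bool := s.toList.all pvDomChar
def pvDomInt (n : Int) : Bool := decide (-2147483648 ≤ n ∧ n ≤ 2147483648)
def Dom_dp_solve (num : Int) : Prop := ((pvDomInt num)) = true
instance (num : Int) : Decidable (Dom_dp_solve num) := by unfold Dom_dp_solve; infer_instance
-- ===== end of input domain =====

-- B replaces A's memoized digit-DP recursion by a single left-to-right combinatorial walk that
-- adds closed-form binomial tail counts (sum of C(free,j)*9^j) for each smaller leading digit.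

-- ===== PORT A =====
-- list(map(int, str(num))): exact for num ≥ 0 (every character is a decimal digit there;
-- Python raises ValueError on the '-' of a negative num, which Pre_ excludes).
def pvDigitsOf (num : Int) : List Int :=
  (PySem.Int.toStr num).toList.map (fun c => ((c.toNat : Int) - 48))

-- A's inner `dp`, recursing on the remaining digit list (idx ↦ suffix of num_arr);
-- dpALoop is the `for digit in range(max_digit + 1)` loop accumulating `res`.
mutual
def dpA : List Int → Int → Bool → Bool → Int
  | [], _, _, izl => if izl then 0 else 1
  | d :: rest, nzc, under, izl =>
    let maxd : Int := if under then 9 else d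
    dpALoop rest nzc under izl maxd (PySem.List.pyRange 0 (maxd + 1) 1) 0
  termination_by l _ _ _ => (2 * l.length, 0)

def dpALoop (rest : List Int) (nzc : Int) (under izl : Bool) (maxd : Int) :
    List Int → Int → Int
  | [], res => res
  | digit :: ds, res =>
    dpALoop rest nzc under izl maxd ds
      (if digit ≠ 0 ∧ nzc ≥ 3 then res
       else res + dpA rest (nzc + if digit ≠ 0 then 1 else 0)
              (under || decide (digit ≠ maxd)) (izl && decide (digit = 0)))
  termination_by digits _ => (2 * rest.length + 1, digits.length)
  decreasing_by all_goals (simp_wf; omega)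
end

def dp_solve (num : Int) : Int :=
  dpA (pvDigitsOf num) 0 false true

-- ===== PORT B =====
-- classy_tail(free, k) = sum(comb(free, j) * 9**j for j in range(k + 1))
def classy_tail (free : Int) (k : Int) : Int :=
  (PySem.List.pyRange 0 (k + 1) 1).foldl
    (fun s j => s + (Nat.choose free.toNat j.toNat : Int) * 9 ^ j.toNat) 0

def dp_solve_alt (num : Int) : Int :=
  let digits := pvDigitsOf num
  let n : Int := PySem.List.len digits
  let st :=
    (PySem.List.enumerate digits 0).foldl
      (fun (st : Int × Int) (p : Int × Int) =>
        let free : Int := n - 1 - p.1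
        let total :=
          (PySem.List.pyRange 0 p.2 1).foldl
            (fun t c =>
              let nz := st.2 + (if c ≠ 0 then 1 else 0)
              if nz ≤ 3 then t + classy_tail free (3 - nz) else t) st.1
        (total, st.2 + (if p.2 ≠ 0 then 1 else 0)))
      (0, 0)
  (if st.2 ≤ 3 then st.1 + 1 else st.1) - 1

-- ===== PRECONDITION & SPEC =====
-- Python's int(c) raises ValueError on the '-' sign of a negative num, so A (and B) return only for num ≥ 0.
def Pre_dp_solve (num : Int) : Prop := 0 ≤ num
instance (num : Int) : Decidable (Pre_dp_solve num) := by unfold Pre_dp_solve; infer_instance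
def pvWitness_dp_solve : Int := (314)

def Spec_dp_solve (num : Int) (out : Int) : Prop := out = dp_solve_alt num
instance (num : Int) (out : Int) : Decidable (Spec_dp_solve num out) := by unfold Spec_dp_solve; infer_instance

-- ===== CLAIM (what is proved, stated in full; the proofs are below) =====
def Claim_equal_dp_solve : Prop := ∀ (num : Int), Dom_dp_solve num → Pre_dp_solve num → Spec_dp_solve num (dp_solve num)

-- ===== LEMMAS AND PROOFS =====

-- the value of A's dp once `under` is true: depends only on the number of remaining positions
def pvT : Nat → Int → Bool → Int
  | 0, _, izl => if izl then 0 else 1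
  | f + 1, nzc, izl => pvT f nzc izl + (if nzc ≥ 3 then 0 else 9 * pvT f (nzc + 1) false)

-- one step of B's inner loop over the smaller leading digits, `f` = number of free positions
def pvStep (nzc f : Int) (t c : Int) : Int :=
  let nz := nzc + (if c ≠ 0 then 1 else 0)
  if nz ≤ 3 then t + classy_tail f (3 - nz) else t

-- B's walk value on a digit suffix, with free positions = length of the remaining list
def pvWalk : List Int → Int → Int
  | [], nzc => if nzc ≤ 3 then 1 else 0
  | d :: r, nzc =>
    (PySem.List.pyRange 0 d 1).foldl (pvStep nzc (r.length : Int)) 0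
      + pvWalk r (nzc + (if d ≠ 0 then 1 else 0))


theorem dpALoop_append (rest : List Int) (nzc : Int) (under izl : Bool) (maxd : Int)
    (L1 L2 : List Int) (res : Int) :
    dpALoop rest nzc under izl maxd (L1 ++ L2) res
      = dpALoop rest nzc under izl maxd L2 (dpALoop rest nzc under izl maxd L1 res) := by
  induction L1 generalizing res with
  | nil => simp [dpALoop]
  | cons x xs ih => rw [List.cons_append, dpALoop, dpALoop, ih]

theorem dpA_under (l : List Int) (nzc : Int) (izl : Bool) :
    dpA l nzc true izl = pvT l.length nzc izl := by
  induction l generalizing nzc izl with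
  | nil => simp [dpA, pvT]
  | cons d rest ih =>
    rw [dpA]
    show dpALoop rest nzc true izl 9 (PySem.List.pyRange 0 (9 + 1) 1) 0
      = pvT (d :: rest).length nzc izl
    rw [show PySem.List.pyRange 0 ((9 : Int) + 1) 1 = [0,1,2,3,4,5,6,7,8,9] from by decide]
    norm_num [dpALoop, ih]
    by_cases hc : nzc ≥ 3 <;> simp [pvT, hc] <;> ring

theorem classy_tail_zero (f : Nat) : classy_tail (f : Int) 0 = 1 := by
  rw [classy_tail, show (0 : Int) + 1 = 1 from rfl,
    show PySem.List.pyRange 0 (1 : Int) 1 = [0] from by decide]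
  simp

theorem classy_tail_succ (f : Nat) (k : Int) (hk : 0 ≤ k) (hk3 : k ≤ 3) :
    classy_tail ((f : Int) + 1) k = classy_tail (f : Int) k + 9 * classy_tail (f : Int) (k - 1) := by
  have hcast : (((f : Int) + 1)).toNat = f + 1 := by omega
  have hch2 : (f + 1).choose (Int.toNat 2) = f.choose 1 + f.choose 2 := Nat.choose_succ_succ f 1
  have hch3 : (f + 1).choose (Int.toNat 3) = f.choose 2 + f.choose 3 := Nat.choose_succ_succ f 2
  have ht2 : Int.toNat 2 = 2 := rfl
  have ht3 : Int.toNat 3 = 3 := rfl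
  have hr0 : PySem.List.pyRange 0 ((0:Int)) 1 = [] := by decide
  have hr1 : PySem.List.pyRange 0 ((1:Int)) 1 = [0] := by decide
  have hr2 : PySem.List.pyRange 0 ((2:Int)) 1 = [0, 1] := by decide
  have hr3 : PySem.List.pyRange 0 ((3:Int)) 1 = [0, 1, 2] := by decide
  have hr4 : PySem.List.pyRange 0 ((4:Int)) 1 = [0, 1, 2, 3] := by decide
  interval_cases k <;>
    rw [classy_tail, classy_tail, classy_tail] <;>
    norm_num [hcast, hr0, hr1, hr2, hr3, hr4, Nat.choose_one_right] <;>
    (try rw [hch2]) <;> (try rw [hch3]) <;> norm_num [ht2, ht3, Nat.choose_one_right] <;>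
    push_cast <;> ring

theorem pvT_closed (f : Nat) (nzc : Int) (h0 : 0 ≤ nzc) (h3 : nzc ≤ 3) :
    pvT f nzc false = classy_tail (f : Int) (3 - nzc) := by
  induction f generalizing nzc with
  | zero =>
    interval_cases nzc <;> simp [pvT] <;> decide
  | succ f ih =>
    have hcast : ((f + 1 : Nat) : Int) = (f : Int) + 1 := by push_cast; ring
    by_cases hc : nzc >= 3
    · have h33 : nzc = 3 := le_antisymm h3 hc
      subst h33
      have l : pvT (f + 1) 3 false = pvT f 3 false := by simp [pvT]
      rw [l, ih 3 (by norm_num) le_rfl, show (3 : Int) - 3 = 0 from rfl,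
        classy_tail_zero, classy_tail_zero]
    · push_neg at hc
      have l : pvT (f + 1) nzc false = pvT f nzc false + 9 * pvT f (nzc + 1) false := by
        simp [pvT, if_neg (by omega : ¬ nzc ≥ 3)]
      rw [l, ih nzc h0 h3, ih (nzc + 1) (by omega) (by omega), hcast,
        classy_tail_succ f (3 - nzc) (by omega) (by omega),
        show (3 : Int) - nzc - 1 = 3 - (nzc + 1) from by ring]

theorem pvT_zl (f : Nat) : pvT f 0 true = classy_tail (f : Int) 3 - 1 := by
  induction f with
  | zero => simp [pvT]; decide
  | succ f ih =>
    have hcast : ((f + 1 : Nat) : Int) = (f : Int) + 1 := by push_cast; ring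
    have l : pvT (f + 1) 0 true = pvT f 0 true + 9 * pvT f 1 false := by
      simp [pvT, if_neg (by norm_num : ¬ (0 : Int) ≥ 3)]
    rw [l, ih, pvT_closed f 1 (by norm_num) (by norm_num),
      show (3 : Int) - 1 = 2 from rfl, hcast,
      classy_tail_succ f 3 (by norm_num) (by norm_num),
      show (3 : Int) - 1 = 2 from rfl]
    ring

theorem pvStep_shift (L : List Int) (nzc f : Int) (t : Int) :
    L.foldl (pvStep nzc f) t = t + L.foldl (pvStep nzc f) 0 := by
  induction L generalizing t with
  | nil => simp
  | cons c cs ih =>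
    rw [List.foldl_cons, List.foldl_cons, ih, ih (pvStep nzc f 0 c)]
    simp only [pvStep]
    split_ifs <;> ring

theorem pvStep_dead (L : List Int) (nzc f : Int) (hm : 4 ≤ nzc) (t : Int) :
    L.foldl (pvStep nzc f) t = t := by
  induction L generalizing t with
  | nil => rfl
  | cons c cs ih =>
    rw [List.foldl_cons]
    have h : pvStep nzc f t c = t := by
      simp only [pvStep]
      rw [if_neg (by split_ifs <;> omega)]
    rw [h, ih]

theorem pvWalk_dead (r : List Int) (m : Int) (hm : 4 ≤ m) : pvWalk r m = 0 := by
  induction r generalizing m with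
  | nil => simp [pvWalk]; omega
  | cons d r ih =>
    rw [pvWalk, pvStep_dead _ _ _ hm,
      ih (m + if d ≠ 0 then 1 else 0) (by split_ifs <;> omega)]
    norm_num

-- A's inner loop over smaller-than-max digits computes B's inner loop step by step
theorem dpALoop_eq_foldl (r : List Int) (nzc : Int) (h0 : 0 ≤ nzc) (h3 : nzc ≤ 3)
    (izl : Bool) (maxd : Int) (L : List Int)
    (hL : ∀ c ∈ L, c ≠ maxd ∧ (izl = true → c ≠ 0)) (t : Int) :
    dpALoop r nzc false izl maxd L t = L.foldl (pvStep nzc (r.length : Int)) t := by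
  induction L generalizing t with
  | nil => simp [dpALoop]
  | cons c cs ih =>
    obtain ⟨hcm, hcz⟩ := hL c List.mem_cons_self
    rw [dpALoop, List.foldl_cons, ih (fun x hx => hL x (List.mem_cons_of_mem c hx))]
    congr 1
    have hu : (false || decide (c ≠ maxd)) = true := by simp [hcm]
    have hz : (izl && decide (c = 0)) = false := by
      cases izl with
      | false => simp
      | true => simp [hcz rfl]
    rw [hu, hz, dpA_under]
    by_cases hc0 : c = 0
    · subst hc0
      simp [pvStep, pvT_closed r.length nzc h0 h3, h3]
    · by_cases hge : nzc ≥ 3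
      · rw [if_pos ⟨hc0, hge⟩]
        simp [pvStep, hc0, show ¬ (nzc + 1 ≤ 3) from by omega]
      · rw [if_neg (by tauto)]
        simp [pvStep, hc0, pvT_closed r.length (nzc + 1) (by omega) (by omega),
          show nzc + 1 ≤ 3 from by omega]
        try ring


theorem dpA_tight (r : List Int) (hr : ∀ d ∈ r, 0 ≤ d) (nzc : Int)
    (h0 : 0 ≤ nzc) (h3 : nzc ≤ 3) :
    dpA r nzc false false = pvWalk r nzc := by
  induction r generalizing nzc with
  | nil => simp [dpA, pvWalk, h3]
  | cons d r ih =>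
    have hd : 0 ≤ d := hr d List.mem_cons_self
    have hr' : ∀ x ∈ r, 0 ≤ x := fun x hx => hr x (List.mem_cons_of_mem d hx)
    rw [dpA]
    simp only [Bool.false_eq_true, if_false]
    rw [PySem.List.pyRange_one_succ_right hd, dpALoop_append]
    rw [dpALoop_eq_foldl r nzc h0 h3 false d (PySem.List.pyRange 0 d 1)
      (fun c hc => ⟨by have := (PySem.List.mem_pyRange_one.mp hc).2; omega, by simp⟩)]
    rw [dpALoop, dpALoop]
    rw [pvWalk]
    by_cases hc : d ≠ 0 ∧ nzc ≥ 3
    · rw [if_pos hc]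
      rw [pvWalk_dead r _ (by rcases hc with ⟨h1, h2⟩; simp [h1]; omega)]
      ring
    · rw [if_neg hc]
      have hz : (false && decide (d = 0)) = false := by simp
      have hu : (false || decide (d ≠ d)) = false := by simp
      rw [hu, hz, ih hr' (nzc + if d ≠ 0 then 1 else 0) (by split_ifs <;> omega)
        (by by_cases hd0 : d = 0 <;> simp [hd0] at hc ⊢ <;> omega)]

theorem dpA_top (d0 : Int) (hd0 : 1 ≤ d0) (r : List Int) (hr : ∀ d ∈ r, 0 ≤ d) :
    dpA (d0 :: r) 0 false true = pvWalk (d0 :: r) 0 - 1 := by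
  rw [dpA]
  simp only [Bool.false_eq_true, if_false]
  have hsplit : PySem.List.pyRange 0 (d0 + 1) 1 = 0 :: (PySem.List.pyRange 1 d0 1 ++ [d0]) := by
    rw [PySem.List.pyRange_one_cons (by omega), zero_add,
      PySem.List.pyRange_one_succ_right hd0]
  rw [hsplit, dpALoop, dpALoop_append]
  have hfirst : (if (0 : Int) ≠ 0 ∧ (0 : Int) ≥ 3 then (0 : Int)
      else 0 + dpA r (0 + if (0 : Int) ≠ 0 then 1 else 0)
        (false || decide ((0 : Int) ≠ d0)) (true && decide ((0 : Int) = 0)))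
      = classy_tail (r.length : Int) 3 - 1 := by
    rw [if_neg (by simp),
      show (false || decide ((0 : Int) ≠ d0)) = true from by simp; omega,
      show (true && decide ((0 : Int) = 0)) = true from by simp,
      show ((0 : Int) + if (0 : Int) ≠ 0 then 1 else 0) = 0 from by simp,
      zero_add, dpA_under, pvT_zl]
  rw [hfirst]
  rw [dpALoop_eq_foldl r 0 le_rfl (by norm_num) true d0 (PySem.List.pyRange 1 d0 1)
    (fun c hc => by
      have := PySem.List.mem_pyRange_one.mp hc
      exact ⟨by omega, fun _ => by omega⟩)]
  rw [dpALoop, dpALoop]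
  rw [if_neg (by omega : ¬ (d0 ≠ 0 ∧ (0 : Int) ≥ 3))]
  rw [show (false || decide (d0 ≠ d0)) = false from by simp,
    show (true && decide (d0 = 0)) = false from by simp; omega]
  rw [dpA_tight r hr (0 + if d0 ≠ 0 then 1 else 0) (by split_ifs <;> omega) (by split_ifs <;> omega)]
  rw [pvWalk]
  rw [show PySem.List.pyRange 0 d0 1 = 0 :: PySem.List.pyRange 1 d0 1 from by
    rw [PySem.List.pyRange_one_cons (by omega), zero_add]]
  rw [List.foldl_cons]
  rw [show pvStep 0 (r.length : Int) 0 0 = classy_tail (r.length : Int) 3 from by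
    simp [pvStep]]
  rw [pvStep_shift _ _ _ (classy_tail (r.length : Int) 3 - 1),
    pvStep_shift _ _ _ (classy_tail (r.length : Int) 3)]
  have : (0 + if d0 ≠ 0 then (1 : Int) else 0) = 1 := by split_ifs <;> omega
  rw [this]
  ring

-- one step of B's outer fold over enumerate(digits)
def pvBStep (n : Int) (st : Int × Int) (p : Int × Int) : Int × Int :=
  let free : Int := n - 1 - p.1
  let total :=
    (PySem.List.pyRange 0 p.2 1).foldl
      (fun t c =>
        let nz := st.2 + (if c ≠ 0 then 1 else 0)
        if nz ≤ 3 then t + classy_tail free (3 - nz) else t) st.1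
  (total, st.2 + (if p.2 ≠ 0 then 1 else 0))

theorem alt_fold (n : Int) (l : List Int) (s total nzc : Int)
    (hn : s + (l.length : Int) = n) :
    (let st := (PySem.List.enumerate l s).foldl (pvBStep n) (total, nzc)
     (if st.2 ≤ 3 then st.1 + 1 else st.1)) = total + pvWalk l nzc := by
  induction l generalizing s total nzc with
  | nil => simp [pvWalk]; split_ifs <;> ring
  | cons d r ih =>
    rw [PySem.List.enumerate_cons]
    simp only [List.foldl_cons]
    have hfree : n - 1 - s = (r.length : Int) := by
      simp at hn; omega
    have hstep : pvBStep n (total, nzc) (s, d)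
        = ((PySem.List.pyRange 0 d 1).foldl (pvStep nzc (n - 1 - s)) total,
           nzc + (if d ≠ 0 then 1 else 0)) := rfl
    rw [hstep, hfree, pvStep_shift,
      ih (s + 1) _ (nzc + (if d ≠ 0 then 1 else 0)) (by simp at hn ⊢; omega),
      pvWalk]
    ring

theorem alt_eq_walk (num : Int) :
    dp_solve_alt num = pvWalk (pvDigitsOf num) 0 - 1 := by
  have hdef : dp_solve_alt num =
      (let st := (PySem.List.enumerate (pvDigitsOf num) 0).foldl
        (pvBStep (PySem.List.len (pvDigitsOf num))) (0, 0)
       (if st.2 ≤ 3 then st.1 + 1 else st.1)) - 1 := rfl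
  rw [hdef, alt_fold (PySem.List.len (pvDigitsOf num)) (pvDigitsOf num) 0 0 0
    (by simp [PySem.List.len_eq])]
  ring

theorem dp_solve_zero : dp_solve 0 = 0 := by
  rw [dp_solve, show pvDigitsOf 0 = [0] from by decide, dpA]
  simp only [Bool.false_eq_true, if_false]
  rw [show PySem.List.pyRange 0 ((0 : Int) + 1) 1 = [0] from by decide, dpALoop, dpALoop]
  simp [dpA]

theorem alt_zero : dp_solve_alt 0 = 0 := by decide


theorem digit_char_ge (k : Nat) (hk : k < 10) :
    48 ≤ (Nat.digitChar k).toNat := by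
  interval_cases k <;> decide

theorem toDigitsCore_ge (f : Nat) : ∀ (n : Nat) (ds : List Char),
    (∀ c ∈ ds, 48 ≤ c.toNat) → ∀ c ∈ Nat.toDigitsCore 10 f n ds, 48 ≤ c.toNat := by
  induction f with
  | zero => intro n ds hds c hc; exact hds c hc
  | succ f ih =>
    intro n ds hds c hc
    simp only [Nat.toDigitsCore] at hc
    split at hc
    · rcases List.mem_cons.mp hc with h | h
      · subst h; exact digit_char_ge _ (Nat.mod_lt _ (by norm_num))
      · exact hds c h
    · exact ih (n / 10) _ (by
        intro x hx
        rcases List.mem_cons.mp hx with h | h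
        · subst h; exact digit_char_ge _ (Nat.mod_lt _ (by norm_num))
        · exact hds x h) c hc

theorem toDigitsCore_head (f : Nat) : ∀ (n : Nat) (ds : List Char), 0 < n → n ≤ f →
    ∃ c t, Nat.toDigitsCore 10 f n ds = c :: t ∧ 49 ≤ c.toNat := by
  induction f with
  | zero => intro n ds h1 h2; omega
  | succ f ih =>
    intro n ds h1 h2
    simp only [Nat.toDigitsCore]
    split
    · rename_i hdiv
      refine ⟨Nat.digitChar (n % 10), ds, rfl, ?_⟩
      have hn10 : n < 10 := by omega
      have : n % 10 = n := Nat.mod_eq_of_lt hn10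
      rw [this]
      interval_cases n <;> decide
    · rename_i hdiv
      exact ih (n / 10) _ (Nat.pos_of_ne_zero hdiv) (by omega)

theorem digits_shape (num : Int) (h : 1 ≤ num) :
    ∃ d0 r, pvDigitsOf num = d0 :: r ∧ 1 ≤ d0 ∧ ∀ d ∈ r, 0 ≤ d := by
  have hm : 0 < num.toNat := by omega
  have hch : (PySem.Int.toStr num).toList = Nat.toDigitsCore 10 (num.toNat + 1) num.toNat [] := by
    rw [PySem.Int.toList_toStr, PySem.Int.toChars, if_neg (by omega : ¬ num < 0), Nat.toDigits]
  obtain ⟨c, t, hct, hc49⟩ := toDigitsCore_head (num.toNat + 1) num.toNat [] hm (by omega)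
  have h48 : ∀ x ∈ c :: t, 48 ≤ x.toNat := by
    rw [← hct]
    exact toDigitsCore_ge _ _ [] (by simp)
  refine ⟨(c.toNat : Int) - 48, t.map (fun c => ((c.toNat : Int) - 48)), ?_, by omega, ?_⟩
  · rw [pvDigitsOf, hch, hct, List.map_cons]
  · intro d hd
    obtain ⟨x, hx, rfl⟩ := List.mem_map.mp hd
    have := h48 x (List.mem_cons_of_mem c hx)
    omega

-- ===== VERDICT (by name: the statement is the Claim_ definition above) =====
theorem dp_solve_spec : Claim_equal_dp_solve := by
  intro num _ hpre
  unfold Spec_dp_solve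
  rcases eq_or_lt_of_le hpre with h0 | h1
  · rw [← h0]
    show dp_solve 0 = dp_solve_alt 0
    rw [dp_solve_zero, alt_zero]
  · obtain ⟨d0, r, hd, hd0, hr⟩ := digits_shape num h1
    rw [alt_eq_walk, dp_solve, hd, dpA_top d0 hd0 r hr]
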